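-- pv_equiv track=rewrite | github.com/happycoder74/adventofcode | python/y2023/d12/aoc_2023_12.py | possible_patterns
-- ===== SOURCE A (Python) =====
-- def my_product(fill, m, repeat=1):
--     pools = [tuple(fill)] * repeat
--     result = [[]]
--     for pool in pools:
--         result = [x + [y] for x in result for y in pool]
--
--     for prod in result:
--         if sum([len(x) for x in prod]) <= m:
--             yield tuple(prod)
--
-- def possible_patterns(pattern, length) -> list:
--     return_list: list[str] = list()
--     m: int = length - (sum(pattern) + len(pattern) - 1)
--     map_pattern: list[str] = [p * "#" + "." for p in pattern[:-1]] + [pattern[-1] * "#"]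
--     fill: list[str] = [i * "." for i in range(0, m + 1)]
--     fills = my_product(fill, m, repeat=len(map_pattern))
--     for f in fills:
--         s = [a + b for a, b in zip(f, map_pattern)]
--         string_pattern = "".join(s).ljust(length, ".")
--         return_list.append(string_pattern)
--
--     return return_list
-- ===== SOURCE B (Python) =====
-- def possible_patterns(pattern, length):
--     m = length - (sum(pattern) + len(pattern) - 1)
--     blocks = ["#" * p + "." for p in pattern[:-1]] + ["#" * pattern[-1]]
--     states = [(m, "")]
--     for b in blocks:
--         states = [(rem - c, pre + "." * c + b) for rem, pre in states for c in range(rem + 1)]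
--     return [pre.ljust(length, ".") for _, pre in states]
-- ===== Notes on version B (the rewrite author's own statement) =====
-- stated objective: alternative
-- what changed: Instead of materialising the full (m+1)^k Cartesian product of filler strings and filtering by total length, B distributes the m spare dots level by level (stars-and-bars), threading a (remaining-dots, prefix) state per block so only valid arrangements are ever generated, in the same lexicographic order.
import Mathlib
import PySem

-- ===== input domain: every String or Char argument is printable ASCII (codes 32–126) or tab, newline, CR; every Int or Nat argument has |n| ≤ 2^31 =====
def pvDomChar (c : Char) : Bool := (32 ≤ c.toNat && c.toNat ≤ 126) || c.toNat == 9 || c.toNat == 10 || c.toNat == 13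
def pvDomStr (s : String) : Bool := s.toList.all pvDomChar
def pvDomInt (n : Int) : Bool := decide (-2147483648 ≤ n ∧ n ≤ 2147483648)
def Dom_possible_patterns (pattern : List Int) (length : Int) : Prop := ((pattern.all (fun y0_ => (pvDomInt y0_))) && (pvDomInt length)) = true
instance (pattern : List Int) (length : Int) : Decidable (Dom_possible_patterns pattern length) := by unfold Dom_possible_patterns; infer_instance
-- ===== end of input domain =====

-- B replaces A's filtered (m+1)^k Cartesian product with a level-wise stars-and-bars
-- expansion that generates only the valid arrangements, in the same order (objective:
-- alternative).
-- Strings are built only by repetition, concatenation and ljust padding, so they are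
-- represented internally as List Char (exact for these operations) and converted to
-- String at the end.

-- shared string helpers (both Pythons contain the very same expressions
-- '"#" * p', '"." * c' and '.ljust(length, ".")')
-- Python s * n for int n: negative n yields "", hence n.toNat.
def pvRep (c : Char) (n : Int) : List Char := List.replicate n.toNat c
-- Python s.ljust(L, "."): pad with dots up to max(L - len(s), 0).
def pvLjust (s : List Char) (L : Int) : List Char :=
  s ++ List.replicate (L - (s.length : Int)).toNat '.'

-- ===== PORT A =====
-- m = length - (sum(pattern) + len(pattern) - 1)
def pvMA (pattern : List Int) (length : Int) : Int :=
  length - (pattern.sum + (pattern.length : Int) - 1)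
-- map_pattern = [p * "#" + "." for p in pattern[:-1]] + [pattern[-1] * "#"]
def pvMapPattern (pattern : List Int) (last : Int) : List (List Char) :=
  (PySem.List.slice pattern none (some (-1))).map (fun p => pvRep '#' p ++ ['.'])
    ++ [pvRep '#' last]
-- fill = [i * "." for i in range(0, m + 1)]
def pvFill (m : Int) : List (List Char) :=
  (PySem.List.pyRange 0 (m + 1) 1).map (fun i => pvRep '.' i)
-- result = [x + [y] for x in result for y in pool]
def pvProdStep (result : List (List (List Char))) (pool : List (List Char)) :
    List (List (List Char)) :=
  result.flatMap (fun x => pool.map (fun y => x ++ [y]))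
-- my_product(fill, m, repeat): the full product of `repeat` copies of fill, then the
-- generator's filter 'sum([len(x) for x in prod]) <= m' (the caller lists it all).
def pv_my_product (fill : List (List Char)) (m : Int) (rep : Nat) :
    List (List (List Char)) :=
  ((List.replicate rep fill).foldl pvProdStep [[]]).filter
    (fun prod => decide ((prod.map (fun x => (x.length : Int))).sum ≤ m))

def possible_patterns (pattern : List Int) (length : Int) : List String :=
  match PySem.List.pyGet? pattern (-1) with
  | none => []   -- Python raises IndexError on empty pattern; excluded by Pre_
  | some last =>
    (pv_my_product (pvFill (pvMA pattern length)) (pvMA pattern length)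
        (pvMapPattern pattern last).length).map
      (fun f => String.ofList (pvLjust
        (((f.zip (pvMapPattern pattern last)).map (fun ab => ab.1 ++ ab.2)).foldl
          (· ++ ·) []) length))

-- ===== PORT B =====
-- m = length - (sum(pattern) + len(pattern) - 1)
def pvMB (pattern : List Int) (length : Int) : Int :=
  length - (pattern.sum + (pattern.length : Int) - 1)
-- blocks = ["#" * p + "." for p in pattern[:-1]] + ["#" * pattern[-1]]
def pvBlocks (pattern : List Int) (last : Int) : List (List Char) :=
  (PySem.List.slice pattern none (some (-1))).map (fun p => pvRep '#' p ++ ['.'])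
    ++ [pvRep '#' last]
-- states = [(rem - c, pre + "." * c + b) for rem, pre in states for c in range(rem + 1)]
def pvGoStep (states : List (Int × List Char)) (b : List Char) : List (Int × List Char) :=
  states.flatMap (fun s =>
    (PySem.List.pyRange 0 (s.1 + 1) 1).map (fun c => (s.1 - c, s.2 ++ pvRep '.' c ++ b)))

def possible_patterns_alt (pattern : List Int) (length : Int) : List String :=
  match PySem.List.pyGet? pattern (-1) with
  | none => []   -- Python raises IndexError on empty pattern; excluded by Pre_
  | some last =>
    ((pvBlocks pattern last).foldl pvGoStep [(pvMB pattern length, [])]).map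
      (fun s => String.ofList (pvLjust s.2 length))

-- ===== PRECONDITION & SPEC =====
-- Pre_ excludes only the empty pattern, on which both Pythons raise IndexError (pattern[-1]).
def Pre_possible_patterns (pattern : List Int) (length : Int) : Prop := pattern ≠ []
instance (pattern : List Int) (length : Int) : Decidable (Pre_possible_patterns pattern length) := by
  unfold Pre_possible_patterns; infer_instance

def pvWitness_possible_patterns : List Int × Int := ([1, 2], 6)

def Spec_possible_patterns (pattern : List Int) (length : Int) (out : List String) : Prop := out = possible_patterns_alt pattern length
instance (pattern : List Int) (length : Int) (out : List String) : Decidable (Spec_possible_patterns pattern length out) := by unfold Spec_possible_patterns; infer_instance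

-- ===== CLAIM (what is proved, stated in full; the proofs are below) =====
def Claim_equal_possible_patterns : Prop := ∀ (pattern : List Int) (length : Int), Dom_possible_patterns pattern length → Pre_possible_patterns pattern length → Spec_possible_patterns pattern length (possible_patterns pattern length)

-- ===== LEMMAS AND PROOFS =====

-- proof-side recursive form of B's level-wise loop: one state expanded over all blocks
def pvGo (blocks : List (List Char)) (L : Int) (rem : Int) (pre : List Char) :
    List String :=
  match blocks with
  | [] => [String.ofList (pvLjust pre L)]
  | b :: rest =>
    (PySem.List.pyRange 0 (rem + 1) 1).flatMap
      (fun c => pvGo rest L (rem - c) (pre ++ pvRep '.' c ++ b))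

-- B's foldl over states computes pvGo on each starting state, in order
theorem pv_fold_states (L : Int) (blocks : List (List Char)) :
    ∀ states : List (Int × List Char),
    (blocks.foldl pvGoStep states).map (fun s => String.ofList (pvLjust s.2 L))
      = states.flatMap (fun s => pvGo blocks L s.1 s.2) := by
  induction blocks with
  | nil =>
    intro states
    induction states with
    | nil => simp
    | cons s ss ihs => simp_all [pvGo]
  | cons b bs ih =>
    intro states
    rw [List.foldl_cons, ih]
    simp only [pvGoStep, List.flatMap_assoc, List.flatMap_map]
    apply List.flatMap_congr
    intro s _
    rw [pvGo]

-- cons-style product of `n` copies of `fill`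
def pvProdR (fill : List (List Char)) : Nat → List (List (List Char))
  | 0 => [[]]
  | n + 1 => fill.flatMap (fun y => (pvProdR fill n).map (fun t => y :: t))

theorem pv_foldl_replicate (fill : List (List Char)) (n : Nat)
    (r : List (List (List Char))) :
    (List.replicate n fill).foldl pvProdStep r
      = r.flatMap (fun x => (pvProdR fill n).map (fun t => x ++ t)) := by
  induction n generalizing r with
  | zero => simp [pvProdR]
  | succ n ih =>
    rw [List.replicate_succ, List.foldl_cons, ih]
    simp only [pvProdStep, pvProdR, List.flatMap_assoc, List.map_flatMap,
      List.flatMap_map, List.map_map, Function.comp_def, ← List.append_cons]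

theorem pv_foldl_append (l : List (List Char)) (a : List Char) :
    l.foldl (· ++ ·) a = a ++ l.foldl (· ++ ·) [] := by
  induction l generalizing a with
  | nil => simp
  | cons x xs ih =>
    simp only [List.foldl_cons]
    rw [ih, ih ([] ++ x)]
    simp [List.append_assoc]

theorem pv_sumLen_nonneg (t : List (List Char)) :
    0 ≤ (t.map (fun x => (x.length : Int))).sum := by
  induction t with
  | nil => simp
  | cons x xs ih => simp only [List.map_cons, List.sum_cons]; positivity

theorem pv_flatMap_drop {β : Type} (F : Int → List β) (a mid b : Int)
    (h1 : a ≤ mid) (h2 : mid ≤ b) (h : ∀ c, mid ≤ c → c < b → F c = []) :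
    (PySem.List.pyRange a b 1).flatMap F = (PySem.List.pyRange a mid 1).flatMap F := by
  rw [PySem.List.pyRange_one_append a mid b h1 h2, List.flatMap_append]
  have hz : (PySem.List.pyRange mid b 1).flatMap F = [] := by
    apply List.flatMap_eq_nil_iff.mpr
    intro c hc
    have hm := PySem.List.mem_pyRange_one.mp hc
    exact h c hm.1 hm.2
  rw [hz, List.append_nil]

theorem pv_len_rep (c : Int) (h : 0 ≤ c) : ((pvRep '.' c).length : Int) = c := by
  simp [pvRep]; omega

-- the core correspondence: A's filtered product, assembled, is B's recursion
theorem pv_main (m L : Int) (blocks : List (List Char)) :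
    ∀ (pre : List Char) (rem : Int), 0 ≤ rem → rem ≤ m →
    ((pvProdR (pvFill m) blocks.length).filter
      (fun f => decide ((f.map (fun x => (x.length : Int))).sum ≤ rem))).map
      (fun f => String.ofList (pvLjust
        (pre ++ ((f.zip blocks).map (fun ab => ab.1 ++ ab.2)).foldl (· ++ ·) []) L))
    = pvGo blocks L rem pre := by
  induction blocks with
  | nil =>
    intro pre rem h0 _
    simp [pvProdR, pvGo, h0]
  | cons b bs ih =>
    intro pre rem h0 hm
    rw [pvGo]
    simp only [pvFill] at ih ⊢
    simp only [pvProdR, List.length_cons, List.flatMap_map, List.filter_flatMap,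
      List.map_flatMap]
    set PR := pvProdR ((PySem.List.pyRange 0 (m + 1) 1).map fun i => pvRep '.' i)
      bs.length with hPR
    refine Eq.trans (pv_flatMap_drop _ 0 (rem + 1) (m + 1) (by omega) (by omega) ?_) ?_
    · intro c hc1 _
      rw [List.map_eq_nil_iff, List.filter_eq_nil_iff]
      intro f hf
      simp only [List.mem_map] at hf
      obtain ⟨t, _, rfl⟩ := hf
      have hnn := pv_sumLen_nonneg t
      have hl := pv_len_rep c (by omega)
      simp only [List.map_cons, List.sum_cons, hl, decide_eq_true_eq]
      omega
    · apply List.flatMap_congr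
      intro c hc
      have hc' := PySem.List.mem_pyRange_one.mp hc
      have hl := pv_len_rep c hc'.1
      rw [List.filter_map, List.map_map]
      have hpred : List.filter
            ((fun f => decide ((List.map (fun x => (x.length : Int)) f).sum ≤ rem))
              ∘ fun t => pvRep '.' c :: t) PR
          = List.filter
            (fun t => decide ((List.map (fun x => (x.length : Int)) t).sum ≤ rem - c)) PR := by
        apply List.filter_congr
        intro t _
        simp only [Function.comp, List.map_cons, List.sum_cons, hl, decide_eq_decide]
        omega
      rw [hpred, ← ih (pre ++ pvRep '.' c ++ b) (rem - c) (by omega) (by omega)]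
      apply List.map_congr_left
      intro t _
      simp only [Function.comp, List.zip_cons_cons, List.map_cons, List.foldl_cons]
      rw [pv_foldl_append ((t.zip bs).map fun ab => ab.1 ++ ab.2) ([] ++ (pvRep '.' c ++ b))]
      simp [List.append_assoc]

theorem pv_wrap (m L : Int) (blocks : List (List Char)) (hne : blocks ≠ []) :
    (pv_my_product (pvFill m) m blocks.length).map
      (fun f => String.ofList (pvLjust
        (((f.zip blocks).map (fun ab => ab.1 ++ ab.2)).foldl (· ++ ·) []) L))
    = pvGo blocks L m [] := by
  rw [pv_my_product, pv_foldl_replicate]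
  simp only [List.flatMap_cons, List.flatMap_nil, List.append_nil, List.nil_append,
    List.map_id']
  by_cases hm0 : 0 ≤ m
  · rw [← pv_main m L blocks [] m hm0 le_rfl]
    apply List.map_congr_left
    intro f _
    simp
  · obtain ⟨b, bs, rfl⟩ := List.exists_cons_of_ne_nil hne
    have hfill : PySem.List.pyRange 0 (m + 1) 1 = [] :=
      PySem.List.pyRange_one_eq_nil (by omega)
    simp [pvProdR, pvGo, pvFill, hfill]

-- ===== VERDICT (by name: the statement is the Claim_ definition above) =====
theorem possible_patterns_spec : Claim_equal_possible_patterns := by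
  intro pattern length _dom hpre
  unfold Spec_possible_patterns possible_patterns possible_patterns_alt
  rcases hlast : PySem.List.pyGet? pattern (-1) with _ | last
  · exact absurd (by simpa [PySem.List.pyGet?_neg_one, List.getLast?_eq_none_iff]
      using hlast) hpre
  · have hne : pvMapPattern pattern last ≠ [] := by simp [pvMapPattern]
    change _ = ((pvBlocks pattern last).foldl pvGoStep
      [(pvMB pattern length, [])]).map (fun s => String.ofList (pvLjust s.2 length))
    rw [pv_fold_states]
    simp only [List.flatMap_cons, List.flatMap_nil, List.append_nil]
    exact pv_wrap (pvMA pattern length) length (pvMapPattern pattern last) hne
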